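-- pv_equiv track=rewrite | github.com/bread-stealer/FPTheoryExercises | LiveCodingTest/Matrix.py | prop_activ
-- ===== SOURCE A (Python) =====
-- def prop_activ(matriz):
--     new_matriz = [row.copy() for row in matriz]
--     for r in range(len(matriz)):
--         for c in range(len(matriz[r])):
--             if matriz[r][c] == True:
--                 # Fill the entire row
--                 for col in range(len(matriz[r])):
--                     new_matriz[r][col] = True
--                 # Fill the entire column
--                 for row in range(len(matriz)):
--                     new_matriz[row][c] = True
--     return new_matriz
-- ===== SOURCE B (Python) =====
-- def prop_activ(matriz):
--     rows = [any(row) for row in matriz]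
--     cols = set()
--     for row in matriz:
--         for c, v in enumerate(row):
--             if v:
--                 cols.add(c)
--     return [[rows[r] or (c in cols) for c in range(len(row))]
--             for r, row in enumerate(matriz)]
-- ===== Notes on version B (the rewrite author's own statement) =====
-- stated objective: faster
-- what changed: One pass records which rows contain a True and the set of column indices containing a True, then the output is built directly from those, instead of re-filling a whole row and a whole column for every True cell.
import Mathlib
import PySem

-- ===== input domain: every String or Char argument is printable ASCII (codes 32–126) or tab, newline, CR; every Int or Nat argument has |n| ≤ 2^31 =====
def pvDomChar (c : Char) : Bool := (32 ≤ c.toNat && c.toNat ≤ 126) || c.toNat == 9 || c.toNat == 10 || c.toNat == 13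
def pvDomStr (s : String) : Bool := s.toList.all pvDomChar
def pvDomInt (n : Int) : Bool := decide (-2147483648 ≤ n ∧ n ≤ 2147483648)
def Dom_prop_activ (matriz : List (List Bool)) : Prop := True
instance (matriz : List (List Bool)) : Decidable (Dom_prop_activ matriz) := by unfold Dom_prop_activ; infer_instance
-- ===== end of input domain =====

-- B replaces A's re-filling of a whole row and column per True cell by one pass that
-- records the rows and the column indices containing a True, then builds the output
-- from those (objective: faster, asymptotic). Equivalence is about the return value.

-- ===== PORT A =====
-- new_matriz[r][col]=True for all col  +  new_matriz[row][c]=True for all row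
def pvFill (matriz nm : List (List Bool)) (r c : Nat) : List (List Bool) :=
  (nm.set r (List.replicate (matriz.getD r []).length true)).map (fun row => row.set c true)

-- the body of the outer 'for r' loop: 'for c in range(len(matriz[r])): if matriz[r][c]: fill'
def pvRowStep (matriz : List (List Bool)) (nm : List (List Bool)) (r : Nat) : List (List Bool) :=
  (List.range (matriz.getD r []).length).foldl
    (fun nm c => if (matriz.getD r []).getD c false = true then pvFill matriz nm r c else nm) nm

def prop_activ (matriz : List (List Bool)) : List (List Bool) :=
  (List.range matriz.length).foldl (pvRowStep matriz) matriz

-- ===== PORT B =====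
-- rows = [any(row) for row in matriz]; cols = set of column indices holding a True
-- (enumerate(row) ported as List.zipIdx, which pairs (value, index));
-- result row = [has or (c in cols) for c in range(len(row))] over zip(rows, matriz)
def prop_activ_alt (matriz : List (List Bool)) : List (List Bool) :=
  let rows := matriz.map (fun row => row.any (fun v => v))
  let cols := matriz.foldl (fun s row =>
      row.zipIdx.foldl (fun s cv => if cv.1 then PySem.Set.add s cv.2 else s) s)
    ([] : PySem.Set Nat)
  (rows.zip matriz).map (fun p =>
    (List.range p.2.length).map (fun c => p.1 || PySem.Set.contains cols c))

-- ===== PRECONDITION & SPEC =====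
-- Pre_ excludes exactly the inputs where A raises IndexError: a True at column c in
-- some row while another row has length ≤ c (the column-fill assignment goes out of range).
def Pre_prop_activ (matriz : List (List Bool)) : Prop :=
  ∀ r < matriz.length, ∀ c < (matriz.getD r []).length,
    (matriz.getD r []).getD c false = true → ∀ r' < matriz.length, c < (matriz.getD r' []).length
instance (matriz : List (List Bool)) : Decidable (Pre_prop_activ matriz) := by
  unfold Pre_prop_activ; infer_instance

def pvWitness_prop_activ : List (List Bool) := [[false, true], [false, false]]

def Spec_prop_activ (matriz : List (List Bool)) (out : List (List Bool)) : Prop := out = prop_activ_alt matriz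
instance (matriz : List (List Bool)) (out : List (List Bool)) : Decidable (Spec_prop_activ matriz out) := by unfold Spec_prop_activ; infer_instance

-- ===== CLAIM (what is proved, stated in full; the proofs are below) =====
def Claim_equal_prop_activ : Prop := ∀ (matriz : List (List Bool)), Dom_prop_activ matriz → Pre_prop_activ matriz → Spec_prop_activ matriz (prop_activ matriz)

-- ===== LEMMAS AND PROOFS =====

-- entry m i j = m[i][j] read totally; shape = same outer length and row lengths as matriz
def pvEntry (m : List (List Bool)) (i j : Nat) : Bool := (m.getD i []).getD j false

def pvShape (matriz m : List (List Bool)) : Prop :=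
  m.length = matriz.length ∧ ∀ i, (m.getD i []).length = (matriz.getD i []).length

theorem pv_bool_ext (a b : Bool) (h : a = true ↔ b = true) : a = b := by
  cases a <;> cases b <;> simp_all

theorem pv_getD_true_lt (row : List Bool) (j : Nat) (h : row.getD j false = true) :
    j < row.length := by
  by_contra hj
  simp [List.getD_eq_getElem?_getD, List.getElem?_eq_none (by omega : row.length ≤ j)] at h

theorem pv_fill_shape (matriz nm : List (List Bool)) (r c : Nat)
    (hs : pvShape matriz nm) : pvShape matriz (pvFill matriz nm r c) := by
  obtain ⟨h1, h2⟩ := hs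
  unfold pvFill pvShape
  refine ⟨by simp [h1], fun i => ?_⟩
  by_cases hi : i < nm.length
  · rw [List.getD_eq_getElem _ _ (by simpa using hi)]
    simp only [List.getElem_map, List.getElem_set, List.length_set]
    split_ifs with h
    · subst h
      simp
    · rw [← List.getD_eq_getElem nm [] hi]
      exact h2 i
  · rw [List.getD_eq_default _ _ (by simpa using not_lt.mp hi)]
    have := h2 i
    rw [List.getD_eq_default _ _ (by omega)] at this
    simpa [List.getD] using this

theorem pv_fill_entry (matriz nm : List (List Bool)) (r c : Nat)
    (hs : pvShape matriz nm)
    (i j : Nat) (hi : i < matriz.length) (hj : j < (matriz.getD i []).length) :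
    pvEntry (pvFill matriz nm r c) i j
      = (pvEntry nm i j || (decide (r = i) || decide (c = j))) := by
  obtain ⟨h1, h2⟩ := hs
  have hi' : i < nm.length := by omega
  have hrowlen : (nm.getD i []).length = (matriz.getD i []).length := h2 i
  have hrow : (pvFill matriz nm r c).getD i []
      = (if r = i then List.replicate (matriz.getD r []).length true else nm[i]).set c true := by
    unfold pvFill
    rw [List.getD_eq_getElem _ _ (by simpa using hi')]
    simp only [List.getElem_map, List.getElem_set]
  unfold pvEntry
  rw [hrow]
  by_cases h : r = i
  · subst h
    rw [if_pos rfl]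
    rw [List.getD_eq_getElem _ _ (by simpa [List.getD] using hj)]
    rw [List.getElem_set]
    split_ifs with hcj
    · simp [hcj]
    · rw [List.getElem_replicate]
      simp
  · rw [if_neg h]
    rw [List.getD_eq_getElem _ _ (by rw [List.length_set, ← List.getD_eq_getElem nm [] hi']; omega)]
    rw [List.getElem_set]
    split_ifs with hcj
    · simp [h, hcj]
    · have hjlen : j < nm[i].length := by rw [← List.getD_eq_getElem nm [] hi']; omega
      have heq : (nm.getD i []).getD j false = nm[i][j] := by
        simp [List.getD_eq_getElem?_getD, hi', hjlen]
      rw [heq]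
      simp [h, hcj]

theorem pv_inner (matriz : List (List Bool)) (r : Nat) :
    ∀ (Lc : List Nat) (nm : List (List Bool)), pvShape matriz nm →
      pvShape matriz (Lc.foldl
        (fun nm c => if (matriz.getD r []).getD c false = true then pvFill matriz nm r c else nm) nm) ∧
      ∀ i j, i < matriz.length → j < (matriz.getD i []).length →
        pvEntry (Lc.foldl
          (fun nm c => if (matriz.getD r []).getD c false = true then pvFill matriz nm r c else nm) nm) i j
        = (pvEntry nm i j ||
            Lc.any (fun c => (matriz.getD r []).getD c false && (decide (r = i) || decide (c = j)))) := by
  intro Lc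
  induction Lc with
  | nil => intro nm hs; exact ⟨hs, fun i j _ _ => by simp⟩
  | cons c Lc ih =>
    intro nm hs
    by_cases hv : (matriz.getD r []).getD c false = true
    · have hs' := pv_fill_shape matriz nm r c hs
      obtain ⟨ihs, ihe⟩ := ih (pvFill matriz nm r c) hs'
      refine ⟨by rw [List.foldl_cons, if_pos hv]; exact ihs, fun i j hi hj => ?_⟩
      rw [List.foldl_cons, if_pos hv]
      rw [ihe i j hi hj, pv_fill_entry matriz nm r c hs i j hi hj]
      have hv' : (matriz[r]?.getD [])[c]?.getD false = true := hv
      simp [hv', Bool.or_assoc]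
    · obtain ⟨ihs, ihe⟩ := ih nm hs
      refine ⟨by rw [List.foldl_cons, if_neg hv]; exact ihs, fun i j hi hj => ?_⟩
      rw [List.foldl_cons, if_neg hv]
      rw [ihe i j hi hj]
      have hv' : (matriz[r]?.getD [])[c]?.getD false = false := by simpa using hv
      simp [hv']

theorem pv_outer (matriz : List (List Bool)) :
    ∀ (Lr : List Nat) (nm : List (List Bool)), pvShape matriz nm →
      pvShape matriz (Lr.foldl (pvRowStep matriz) nm) ∧
      ∀ i j, i < matriz.length → j < (matriz.getD i []).length →
        pvEntry (Lr.foldl (pvRowStep matriz) nm) i j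
        = (pvEntry nm i j ||
            Lr.any (fun r => (List.range (matriz.getD r []).length).any
              (fun c => (matriz.getD r []).getD c false && (decide (r = i) || decide (c = j))))) := by
  intro Lr
  induction Lr with
  | nil => intro nm hs; exact ⟨hs, fun i j _ _ => by simp⟩
  | cons r Lr ih =>
    intro nm hs
    obtain ⟨sstep, estep⟩ := pv_inner matriz r (List.range (matriz.getD r []).length) nm hs
    obtain ⟨ihs, ihe⟩ := ih (pvRowStep matriz nm r) (by exact sstep)
    refine ⟨ihs, fun i j hi hj => ?_⟩
    rw [List.foldl_cons, ihe i j hi hj]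
    have : pvEntry (pvRowStep matriz nm r) i j
        = (pvEntry nm i j || (List.range (matriz.getD r []).length).any
            (fun c => (matriz.getD r []).getD c false && (decide (r = i) || decide (c = j)))) :=
      estep i j hi hj
    rw [this]
    simp [Bool.or_assoc]

theorem pv_rowany_iff (matriz : List (List Bool)) (i : Nat) :
    ((matriz.getD i []).any (fun v => v) = true ↔ ∃ c, (matriz.getD i []).getD c false = true) := by
  rw [List.any_eq_true]
  constructor
  · rintro ⟨v, hv, hvt⟩
    obtain ⟨c, hc, rfl⟩ := List.mem_iff_getElem.mp hv
    exact ⟨c, by rw [List.getD_eq_getElem _ _ hc]; simpa using hvt⟩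
  · rintro ⟨c, hc⟩
    have hlt := pv_getD_true_lt _ _ hc
    exact ⟨_, List.getElem_mem hlt, by simpa using (List.getD_eq_getElem _ false hlt ▸ hc)⟩

theorem pv_colany_iff (matriz : List (List Bool)) (j : Nat) :
    (matriz.any (fun row => row.getD j false) = true
      ↔ ∃ r < matriz.length, (matriz.getD r []).getD j false = true) := by
  rw [List.any_eq_true]
  constructor
  · rintro ⟨row, hrow, hval⟩
    obtain ⟨r, hr, rfl⟩ := List.mem_iff_getElem.mp hrow
    exact ⟨r, hr, by rw [List.getD_eq_getElem _ _ hr]; simpa using hval⟩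
  · rintro ⟨r, hr, hv⟩
    exact ⟨_, List.getElem_mem hr, by simpa using (List.getD_eq_getElem _ ([] : List Bool) hr ▸ hv)⟩

theorem pv_A_entry (matriz : List (List Bool))
    (i j : Nat) (hi : i < matriz.length) (hj : j < (matriz.getD i []).length) :
    pvEntry (prop_activ matriz) i j
      = ((matriz.getD i []).any (fun v => v) || matriz.any (fun row => row.getD j false)) := by
  obtain ⟨-, he⟩ := pv_outer matriz (List.range matriz.length) matriz ⟨rfl, fun _ => rfl⟩
  rw [show prop_activ matriz = (List.range matriz.length).foldl (pvRowStep matriz) matriz from rfl,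
      he i j hi hj]
  apply pv_bool_ext
  simp only [Bool.or_eq_true]
  rw [pv_rowany_iff, pv_colany_iff]
  simp only [List.any_eq_true, List.mem_range, Bool.and_eq_true, Bool.or_eq_true, decide_eq_true_eq]
  constructor
  · rintro (hv | ⟨r, hr, c, hc, hval, (rfl | rfl)⟩)
    · exact Or.inl ⟨j, hv⟩
    · exact Or.inl ⟨c, hval⟩
    · exact Or.inr ⟨r, hr, hval⟩
  · rintro (⟨c, hc⟩ | ⟨r, hr, hv⟩)
    · exact Or.inr ⟨i, hi, c, pv_getD_true_lt _ _ hc, hc, Or.inl rfl⟩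
    · exact Or.inr ⟨r, hr, j, pv_getD_true_lt _ _ hv, hv, Or.inr rfl⟩

theorem pv_A_shape (matriz : List (List Bool)) : pvShape matriz (prop_activ matriz) :=
  (pv_outer matriz (List.range matriz.length) matriz ⟨rfl, fun _ => rfl⟩).1

theorem pv_contains_iff (s : PySem.Set Nat) (x : Nat) :
    PySem.Set.contains s x = true ↔ x ∈ s := by
  simp [PySem.Set.contains]

theorem pv_addfold_mem (l : List (Bool × Nat)) :
    ∀ (s : PySem.Set Nat) (c : Nat),
      c ∈ l.foldl (fun s cv => if cv.1 then PySem.Set.add s cv.2 else s) s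
        ↔ c ∈ s ∨ (true, c) ∈ l := by
  induction l with
  | nil => intro s c; simp
  | cons cv l ih =>
    intro s c
    obtain ⟨b, k⟩ := cv
    cases b
    · rw [List.foldl_cons, if_neg (by simp)]
      rw [ih s c]
      simp
    · rw [List.foldl_cons, if_pos rfl]
      rw [ih (PySem.Set.add s k) c, PySem.Set.mem_add s k c]
      simp only [List.mem_cons, Prod.mk.injEq]
      tauto
  
theorem pv_cols_mem (matriz : List (List Bool)) (j : Nat) :
    ∀ s : PySem.Set Nat,
      (j ∈ matriz.foldl (fun s row =>
          row.zipIdx.foldl (fun s cv => if cv.1 then PySem.Set.add s cv.2 else s) s) s)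
      ↔ j ∈ s ∨ ∃ row ∈ matriz, row.getD j false = true := by
  induction matriz with
  | nil => intro s; simp
  | cons row matriz ih =>
    intro s
    rw [List.foldl_cons, ih, pv_addfold_mem]
    have hz : (true, j) ∈ row.zipIdx ↔ row.getD j false = true := by
      rw [List.mem_zipIdx_iff_getElem?]
      constructor
      · intro h
        have h2 := List.getElem?_eq_some_iff.mp h
        rw [List.getD_eq_getElem _ _ h2.1]
        obtain ⟨hlt, hval⟩ := h2
        simp [hval]
      · intro h
        have hlt := pv_getD_true_lt row j h
        rw [List.getD_eq_getElem _ _ hlt] at h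
        simp [hlt, h]
    rw [hz]
    simp only [List.mem_cons]
    constructor
    · rintro ((h | h) | ⟨r, hr, hv⟩)
      · exact Or.inl h
      · exact Or.inr ⟨row, Or.inl rfl, h⟩
      · exact Or.inr ⟨r, Or.inr hr, hv⟩
    · rintro (h | ⟨r, (rfl | hr), hv⟩)
      · exact Or.inl (Or.inl h)
      · exact Or.inl (Or.inr hv)
      · exact Or.inr ⟨r, hr, hv⟩

theorem pv_colany_iff' (matriz : List (List Bool)) (j : Nat) :
    (matriz.any (fun row => row.getD j false) = true
      ↔ ∃ row ∈ matriz, row.getD j false = true) := by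
  rw [List.any_eq_true]

theorem pv_contains_colany (matriz : List (List Bool)) (c : Nat) :
    PySem.Set.contains (matriz.foldl (fun s row =>
        row.zipIdx.foldl (fun s cv => if cv.1 then PySem.Set.add s cv.2 else s) s)
      ([] : PySem.Set Nat)) c
      = matriz.any (fun row => row.getD c false) := by
  apply pv_bool_ext
  rw [pv_contains_iff, pv_cols_mem, pv_colany_iff']
  simp

theorem pv_B_eq (matriz : List (List Bool)) :
    prop_activ_alt matriz
      = (List.range matriz.length).map (fun i =>
          (List.range (matriz.getD i []).length).map (fun j =>
            (matriz.getD i []).any (fun v => v) || matriz.any (fun row => row.getD j false))) := by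
  rw [show prop_activ_alt matriz
      = ((matriz.map (fun row => row.any (fun v => v))).zip matriz).map (fun p =>
          (List.range p.2.length).map (fun c => p.1 ||
            PySem.Set.contains (matriz.foldl (fun s row =>
                row.zipIdx.foldl (fun s cv => if cv.1 then PySem.Set.add s cv.2 else s) s)
              ([] : PySem.Set Nat)) c)) from rfl]
  apply List.ext_getElem
  · simp
  · intro i hi hi2
    have hiR : i < matriz.length := by simpa using hi2
    simp only [List.getElem_map, List.getElem_zip, List.getElem_range]
    rw [List.getD_eq_getElem matriz [] hiR]
    apply List.map_congr_left
    intro c _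
    rw [pv_contains_colany]


theorem pv_A_eq (matriz : List (List Bool)) :
    prop_activ matriz
      = (List.range matriz.length).map (fun i =>
          (List.range (matriz.getD i []).length).map (fun j =>
            (matriz.getD i []).any (fun v => v) || matriz.any (fun row => row.getD j false))) := by
  obtain ⟨hlen, hrows⟩ := pv_A_shape matriz
  apply List.ext_getElem
  · simp [hlen]
  · intro i hi hi2
    have hiR : i < matriz.length := by omega
    simp only [List.getElem_map, List.getElem_range]
    apply List.ext_getElem
    · have := hrows i
      rw [List.getD_eq_getElem _ _ (by omega : i < (prop_activ matriz).length)] at this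
      simp [this]
    · intro j hj hj2
      have hjC : j < (matriz.getD i []).length := by
        have := hrows i
        rw [List.getD_eq_getElem _ _ (by omega : i < (prop_activ matriz).length)] at this
        omega
      have hE : (prop_activ matriz)[i][j] = pvEntry (prop_activ matriz) i j := by
        unfold pvEntry
        rw [List.getD_eq_getElem _ _ (by omega : i < (prop_activ matriz).length),
            List.getD_eq_getElem _ _ (by omega : j < (prop_activ matriz)[i].length)]
      rw [hE, pv_A_entry matriz i j hiR hjC]
      simp

-- ===== VERDICT (by name: the statement is the Claim_ definition above) =====
theorem prop_activ_spec : Claim_equal_prop_activ := by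
  intro matriz _ _
  unfold Spec_prop_activ
  rw [pv_A_eq, pv_B_eq]
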